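-- pv_equiv track=rewrite | github.com/jadesym/interview | leetcode/1725.number-of-rectangles-that-can-form-the-largest-square/solution.py | countGoodRectangles
-- ===== SOURCE A (Python) =====
-- from typing import List
--
-- def countGoodRectangles(rectangles: List[List[int]]) -> int:
--     maxLen = 0
--     maxCount = 0
--     for x, y in rectangles:
--         maxLocal = min(x, y)
--         if maxLen < maxLocal:
--             maxLen = maxLocal
--             maxCount = 1
--         elif maxLen == maxLocal:
--             maxCount += 1
--     return maxCount
-- ===== SOURCE B (Python) =====
-- from typing import List
--
-- def countGoodRectangles(rectangles: List[List[int]]) -> int: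
--     sides = [min(x, y) for x, y in rectangles]
--     m = max([0] + sides)
--     return sides.count(m)
-- ===== Notes on version B (the rewrite author's own statement) =====
-- stated objective: simpler
-- what changed: B replaces A's single pass maintaining a running maximum with a reset-or-increment counter by a compute-then-count decomposition: build the list of square sides, take its maximum (seeded with 0), and count its occurrences.
import Mathlib
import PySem

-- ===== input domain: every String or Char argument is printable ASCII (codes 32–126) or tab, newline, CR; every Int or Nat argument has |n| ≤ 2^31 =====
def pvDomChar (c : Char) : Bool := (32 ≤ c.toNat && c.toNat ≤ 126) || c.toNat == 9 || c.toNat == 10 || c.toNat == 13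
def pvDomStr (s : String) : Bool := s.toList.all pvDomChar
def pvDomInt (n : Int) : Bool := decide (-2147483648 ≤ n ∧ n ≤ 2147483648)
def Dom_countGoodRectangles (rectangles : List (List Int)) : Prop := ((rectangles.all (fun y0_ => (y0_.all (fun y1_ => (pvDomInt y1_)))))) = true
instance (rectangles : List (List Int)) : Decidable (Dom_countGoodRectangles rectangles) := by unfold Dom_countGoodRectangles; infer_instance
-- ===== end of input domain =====

-- B replaces A's one-pass running-max-with-counter by a compute-sides / max / count decomposition (same cost, simpler).


-- ===== PORT A =====
-- one pass; state (maxLen, maxCount); a row that is not a pair would be a ValueError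
-- in Python (excluded by Pre_), the port leaves the state unchanged there.
def countGoodRectangles (rectangles : List (List Int)) : Int :=
  (rectangles.foldl (fun st r =>
    match r with
    | [x, y] =>
      let maxLocal := min x y
      if st.1 < maxLocal then (maxLocal, 1)
      else if st.1 = maxLocal then (st.1, st.2 + 1)
      else st
    | _ => st) ((0 : Int), (0 : Int))).2

-- ===== PORT B =====
-- sides = [min(x, y) ...]; m = max([0] + sides); return sides.count(m)
-- (the pair [x, y] is read as head/second element; a non-pair row is a
-- ValueError in Python, excluded by Pre_)
def countGoodRectangles_alt (rectangles : List (List Int)) : Int :=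
  let sides := rectangles.map (fun r => min (r.headD 0) (r.tail.headD 0))
  let m := ((0 : Int) :: sides).foldl max 0
  (sides.count m : Int)

-- ===== PRECONDITION & SPEC =====
-- Pre_ excludes exactly the inputs where Python's 'for x, y in rectangles' raises
-- ValueError (a row that is not a pair); both A and B raise there.
def Pre_countGoodRectangles (rectangles : List (List Int)) : Prop :=
  ∀ r ∈ rectangles, r.length = 2
instance (rectangles : List (List Int)) : Decidable (Pre_countGoodRectangles rectangles) := by
  unfold Pre_countGoodRectangles; infer_instance
def pvWitness_countGoodRectangles : List (List Int) := [[5, 8], [3, 9], [5, 12], [16, 5]]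

def Spec_countGoodRectangles (rectangles : List (List Int)) (out : Int) : Prop :=
  out = countGoodRectangles_alt rectangles
instance (rectangles : List (List Int)) (out : Int) : Decidable (Spec_countGoodRectangles rectangles out) := by
  unfold Spec_countGoodRectangles; infer_instance

-- ===== CLAIM (what is proved, stated in full; the proofs are below) =====
def Claim_equal_countGoodRectangles : Prop := ∀ (rectangles : List (List Int)), Dom_countGoodRectangles rectangles → Pre_countGoodRectangles rectangles → Spec_countGoodRectangles rectangles (countGoodRectangles rectangles)

-- ===== LEMMAS AND PROOFS =====

-- the step of A's loop, expressed on a side value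
def pvStep (st : Int × Int) (s : Int) : Int × Int :=
  if st.1 < s then (s, 1) else if st.1 = s then (st.1, st.2 + 1) else st

-- characterisation of A's loop on the list of sides
theorem pvStep_foldl (sides : List Int) (m c : Int) :
    sides.foldl pvStep (m, c) =
      (sides.foldl max m,
       if sides.foldl max m = m then c + (sides.count m : Int)
       else (sides.count (sides.foldl max m) : Int)) := by
  induction sides generalizing m c with
  | nil => simp
  | cons s rest ih =>
    have hle : ∀ (l : List Int) (a : Int), a ≤ l.foldl max a := by
      intro l
      induction l with
      | nil => intro a; simp
      | cons b t iht =>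
        intro a
        calc a ≤ max a b := le_max_left a b
        _ ≤ t.foldl max (max a b) := iht (max a b)
    simp only [List.foldl_cons, List.count_cons]
    by_cases h1 : m < s
    · have hstep : pvStep (m, c) s = (s, 1) := by simp [pvStep, h1]
      have hmax : max m s = s := by omega
      rw [hstep, hmax, ih]
      have hM : s ≤ rest.foldl max s := hle rest s
      have hMm : rest.foldl max s ≠ m := by omega
      simp only [hMm, if_false]
      by_cases h2 : rest.foldl max s = s
      · simp [h2]; omega
      · have hne : (s == rest.foldl max s) = false := by simp; omega
        simp [h2, hne]
    · by_cases h2 : m = s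
      · subst h2
        have hstep : pvStep (m, c) m = (m, c + 1) := by simp [pvStep]
        have hmax : max m m = m := by omega
        rw [hstep, hmax, ih]
        by_cases h3 : rest.foldl max m = m
        · simp [h3]; omega
        · have hne : (m == rest.foldl max m) = false := by simp; omega
          simp [h3, hne]
      · have hstep : pvStep (m, c) s = (m, c) := by simp [pvStep, h1, h2]
        have hmax : max m s = m := by omega
        rw [hstep, hmax, ih]
        by_cases h3 : rest.foldl max m = m
        · have : (s == m) = false := by simp; omega
          simp [h3, this]
        · have hM : m ≤ rest.foldl max m := hle rest m
          have : (s == rest.foldl max m) = false := by simp; omega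
          simp [h3, this]

-- A's fold over rows equals the pvStep fold over the mapped sides (rows are pairs under Pre_)
theorem pvFold_rows (rectangles : List (List Int)) (st : Int × Int)
    (h : ∀ r ∈ rectangles, r.length = 2) :
    rectangles.foldl (fun st r =>
      match r with
      | [x, y] =>
        let maxLocal := min x y
        if st.1 < maxLocal then (maxLocal, 1)
        else if st.1 = maxLocal then (st.1, st.2 + 1)
        else st
      | _ => st) st =
    (rectangles.map (fun r => min (r.headD 0) (r.tail.headD 0))).foldl pvStep st := by
  induction rectangles generalizing st with
  | nil => rfl
  | cons r rest ih =>
    have hr : r.length = 2 := h r (by simp)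
    match r, hr with
    | [x, y], _ =>
      simp only [List.foldl_cons, List.map_cons]
      rw [ih _ (fun r hm => h r (by simp [hm]))]
      rfl

-- ===== VERDICT (by name: the statement is the Claim_ definition above) =====
theorem countGoodRectangles_spec : Claim_equal_countGoodRectangles := by
  intro rectangles _ hpre
  unfold Spec_countGoodRectangles countGoodRectangles countGoodRectangles_alt
  rw [pvFold_rows _ _ hpre, pvStep_foldl]
  simp only [List.foldl_cons]
  have hmax : max (0 : Int) 0 = 0 := by omega
  rw [hmax]
  split_ifs with h
  · rw [h]; simp
  · rfl
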